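-- pv_equiv track=rewrite | github.com/miguelsantos42/FPRO | Práticas/Prática5/exercise4.py | multi
-- ===== SOURCE A (Python) =====
-- def count(a,b,g):
--     res = 0
--     for x,y in g:
--         if a == x and b == y:
--             res += 1
--     return res
--
-- def multi(g):
--     tup = ()
--     for first, second in g:
--         n = count(first, second,g)
--         if (first, n, second) not in tup:
--             tup += ((first, n, second),)
--         else:
--             continue
--     return tup
-- ===== SOURCE B (Python) =====
-- def multi(g):
--     c = {}
--     for p in g:
--         c[p] = c.get(p, 0) + 1
--     return tuple((a, c[(a, b)], b) for a, b in dict.fromkeys(g))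
-- ===== Notes on version B (the rewrite author's own statement) =====
-- stated objective: faster
-- what changed: B builds a count table in one pass and maps over the first-occurrence-deduplicated pairs (dict.fromkeys), removing A's per-element full rescan (count) and its growing-tuple membership test.
import Mathlib
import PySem

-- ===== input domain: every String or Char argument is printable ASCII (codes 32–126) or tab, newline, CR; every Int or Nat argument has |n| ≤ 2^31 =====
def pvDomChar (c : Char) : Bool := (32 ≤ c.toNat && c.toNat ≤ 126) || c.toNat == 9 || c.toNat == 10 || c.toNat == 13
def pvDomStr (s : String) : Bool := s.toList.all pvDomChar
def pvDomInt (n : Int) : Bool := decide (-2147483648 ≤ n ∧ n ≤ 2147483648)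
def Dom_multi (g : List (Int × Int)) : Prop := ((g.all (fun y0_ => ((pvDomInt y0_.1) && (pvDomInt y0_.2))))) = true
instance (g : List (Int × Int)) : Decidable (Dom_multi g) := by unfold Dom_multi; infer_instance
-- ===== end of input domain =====

-- B replaces A's per-element full rescan (count) and growing-tuple membership test by a
-- one-pass count table plus a map over the first-occurrence-deduplicated pairs (simpler decomposition, one pass per element).

-- ===== PORT A =====
def countA (a b : Int) (g : List (Int × Int)) : Int :=
  g.foldl (fun res p => if a = p.1 ∧ b = p.2 then res + 1 else res) 0

def multi (g : List (Int × Int)) : List (Int × Int × Int) :=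
  g.foldl (fun tup p =>
    let n := countA p.1 p.2 g
    if (p.1, n, p.2) ∈ tup then tup else tup ++ [(p.1, n, p.2)]) []

-- ===== PORT B =====
-- 'c[(a, b)]' in Source B cannot raise (the key always comes from g itself); ported as getD with default 0.
def multi_alt (g : List (Int × Int)) : List (Int × Int × Int) :=
  let c : PySem.Dict (Int × Int) Int :=
    g.foldl (fun d p => d.insert p (d.getD p 0 + 1)) PySem.Dict.empty
  (PySem.List.dedup g).map (fun p => (p.1, c.getD p 0, p.2))

-- ===== PRECONDITION & SPEC =====
def Spec_multi (g : List (Int × Int)) (out : List (Int × Int × Int)) : Prop := out = multi_alt g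
instance (g : List (Int × Int)) (out : List (Int × Int × Int)) : Decidable (Spec_multi g out) := by unfold Spec_multi; infer_instance

-- ===== CLAIM (what is proved, stated in full; the proofs are below) =====
def Claim_equal_multi : Prop := ∀ (g : List (Int × Int)), Dom_multi g → Spec_multi g (multi g)

-- ===== LEMMAS AND PROOFS =====

-- A's inner rescan counts the occurrences of the pair in g.
theorem countA_eq_count (a b : Int) (g : List (Int × Int)) :
    countA a b g = (g.count (a, b) : Int) := by
  unfold countA
  rw [PySem.List.foldl_ite_add_one]
  simp only [zero_add, List.count_eq_countP, Int.natCast_inj]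
  apply List.countP_congr
  intro x _
  simp only [decide_eq_true_eq, beq_iff_eq, Prod.ext_iff]
  exact ⟨fun ⟨h1, h2⟩ => ⟨h1.symm, h2.symm⟩, fun ⟨h1, h2⟩ => ⟨h1.symm, h2.symm⟩⟩

-- The triple A builds for a pair determines the pair (first and third components).
theorem F_inj (g : List (Int × Int)) :
    Function.Injective (fun p : Int × Int => (p.1, countA p.1 p.2 g, p.2)) := by
  intro p q h
  simp only [Prod.mk.injEq] at h
  exact Prod.ext h.1 h.2.2

-- A's dedup-by-triple loop is Set.add on the underlying pairs, mapped through the triple map.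
theorem multi_loop_eq (g : List (Int × Int)) :
    ∀ (l : List (Int × Int)) (s : PySem.Set (Int × Int)),
      l.foldl (fun tup p =>
          let n := countA p.1 p.2 g
          if (p.1, n, p.2) ∈ tup then tup else tup ++ [(p.1, n, p.2)])
        (s.map (fun p => (p.1, countA p.1 p.2 g, p.2)))
      = (l.foldl PySem.Set.add s).map (fun p => (p.1, countA p.1 p.2 g, p.2)) := by
  intro l
  induction l with
  | nil => intro s; rfl
  | cons x t ih =>
    intro s
    simp only [List.foldl_cons]
    have hmem : ((x.1, countA x.1 x.2 g, x.2) ∈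
        s.map (fun p => (p.1, countA p.1 p.2 g, p.2))) ↔ x ∈ s := by
      constructor
      · intro h
        rcases List.mem_map.1 h with ⟨q, hq, hEq⟩
        have := F_inj g hEq
        simpa [this] using hq
      · intro h; exact List.mem_map_of_mem h
    have hadd : PySem.Set.add s x = if x ∈ s then s else s ++ [x] := by
      simp [PySem.Set.add, PySem.Set.contains]
    by_cases hx : x ∈ s
    · rw [show (let n := countA x.1 x.2 g;
          if (x.1, n, x.2) ∈ s.map (fun p => (p.1, countA p.1 p.2 g, p.2))
          then s.map (fun p => (p.1, countA p.1 p.2 g, p.2))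
          else s.map (fun p => (p.1, countA p.1 p.2 g, p.2)) ++ [(x.1, n, x.2)])
          = s.map (fun p => (p.1, countA p.1 p.2 g, p.2)) from by
            simp only []; rw [if_pos (hmem.2 hx)]]
      rw [ih s, show PySem.Set.add s x = s from by rw [hadd, if_pos hx]]
    · rw [show (let n := countA x.1 x.2 g;
          if (x.1, n, x.2) ∈ s.map (fun p => (p.1, countA p.1 p.2 g, p.2))
          then s.map (fun p => (p.1, countA p.1 p.2 g, p.2))
          else s.map (fun p => (p.1, countA p.1 p.2 g, p.2)) ++ [(x.1, countA x.1 x.2 g, x.2)])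
          = (s ++ [x]).map (fun p => (p.1, countA p.1 p.2 g, p.2)) from by
            simp only []; rw [if_neg (fun h => hx (hmem.1 h))]; simp]
      rw [ih (s ++ [x]), show PySem.Set.add s x = s ++ [x] from by rw [hadd, if_neg hx]]

-- ===== VERDICT (by name: the statement is the Claim_ definition above) =====
theorem multi_spec : Claim_equal_multi := by
  intro g _
  unfold Spec_multi
  have hA : multi g =
      (PySem.List.dedup g).map (fun p => (p.1, countA p.1 p.2 g, p.2)) := by
    unfold multi
    have h := multi_loop_eq g g ([] : PySem.Set (Int × Int))
    simpa [PySem.List.dedup_eq_ofList, PySem.Set.ofList_eq_foldl] using h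
  rw [hA]
  simp only [multi_alt]
  apply List.map_congr_left
  intro p _
  rw [countA_eq_count, PySem.Dict.getD_foldl_insert_add_one, PySem.Dict.getD_empty, zero_add]
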